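-- pv_equiv track=rewrite | github.com/SuperSayu/DSMUD | demonsword/commands/StanceCommand.py | validate_skillname
-- ===== SOURCE A (Python) =====
-- def validate_skillname(incoming):
--     if not isinstance(incoming,str) or len(incoming) == 0:
--         return False
--     invalid_chars=[":","#","!","/","\\"]
--     for x in invalid_chars:
--         if x in incoming:
--             return False
--     return True
-- ===== SOURCE B (Python) =====
-- def validate_skillname(incoming):
--     if not isinstance(incoming, str) or len(incoming) == 0:
--         return False
--     invalid = {":", "#", "!", "/", "\\"}
--     return all(c not in invalid for c in incoming)
-- ===== Notes on version B (the rewrite author's own statement) =====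
-- stated objective: idiomatic
-- what changed: Instead of scanning the whole string once per forbidden character (five substring searches), B makes a single pass over the input's characters testing each against a constant set.
import Mathlib
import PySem

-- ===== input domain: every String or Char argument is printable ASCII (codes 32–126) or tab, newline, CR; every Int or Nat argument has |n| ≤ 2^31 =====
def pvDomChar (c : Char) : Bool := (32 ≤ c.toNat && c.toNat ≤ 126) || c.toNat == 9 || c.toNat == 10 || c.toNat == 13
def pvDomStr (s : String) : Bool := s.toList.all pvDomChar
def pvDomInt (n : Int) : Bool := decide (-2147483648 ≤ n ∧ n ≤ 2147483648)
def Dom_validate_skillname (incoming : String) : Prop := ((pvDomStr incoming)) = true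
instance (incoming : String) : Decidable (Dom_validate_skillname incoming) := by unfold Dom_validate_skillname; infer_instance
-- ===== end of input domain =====

-- B replaces A's five substring scans by a single pass over the input's characters against a constant set (idiomatic).

-- ===== PORT A =====
-- loop 'for x in invalid_chars: if x in incoming: return False'
def validate_skillname_loop (cs : List String) (incoming : String) : Bool :=
  match cs with
  | [] => true
  | x :: rest => if PySem.Str.isIn x incoming then false else validate_skillname_loop rest incoming

def validate_skillname (incoming : String) : Bool :=
  if PySem.Str.len incoming = 0 then false
  else validate_skillname_loop [":", "#", "!", "/", "\\"] incoming

-- ===== PORT B =====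
def validate_skillname_alt (incoming : String) : Bool :=
  if PySem.Str.len incoming = 0 then false
  else incoming.toList.all (fun c => ¬ (c = ':' ∨ c = '#' ∨ c = '!' ∨ c = '/' ∨ c = '\\'))

-- ===== PRECONDITION & SPEC =====
def Spec_validate_skillname (incoming : String) (out : Bool) : Prop := out = validate_skillname_alt incoming
instance (incoming : String) (out : Bool) : Decidable (Spec_validate_skillname incoming out) := by unfold Spec_validate_skillname; infer_instance

-- ===== CLAIM (what is proved, stated in full; the proofs are below) =====
def Claim_equal_validate_skillname : Prop := ∀ (incoming : String), Dom_validate_skillname incoming → Spec_validate_skillname incoming (validate_skillname incoming)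

-- ===== LEMMAS AND PROOFS =====
theorem isIn_single_char (c : Char) (s : String) :
    PySem.Chars.isIn [c] s.toList = s.toList.contains c := by
  by_cases h : c ∈ s.toList
  · rw [((PySem.Chars.isIn_iff_infix [c] s.toList).mpr
      ((List.singleton_infix_iff c s.toList).mpr h))]
    simp [h]
  · rw [(PySem.Chars.isIn_eq_false_iff [c] s.toList).mpr
      (fun hc => h ((List.singleton_infix_iff c s.toList).mp hc))]
    simp [h]

theorem loop_eq_all (incoming : String) :
    validate_skillname_loop [":", "#", "!", "/", "\\"] incoming
      = incoming.toList.all (fun c => ¬ (c = ':' ∨ c = '#' ∨ c = '!' ∨ c = '/' ∨ c = '\\')) := by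
  simp only [validate_skillname_loop, PySem.Str.isIn_eq]
  rw [show (":" : String).toList = [':'] from rfl, isIn_single_char,
      show ("#" : String).toList = ['#'] from rfl, isIn_single_char,
      show ("!" : String).toList = ['!'] from rfl, isIn_single_char,
      show ("/" : String).toList = ['/'] from rfl, isIn_single_char,
      show ("\\" : String).toList = ['\\'] from rfl, isIn_single_char]
  induction incoming.toList with
  | nil => simp
  | cons c cs ih =>
    simp only [List.contains_cons, List.all_cons] at *
    by_cases hc : c = ':' ∨ c = '#' ∨ c = '!' ∨ c = '/' ∨ c = '\\'
    · rcases hc with h | h | h | h | h <;> subst h <;> simp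
    · push_neg at hc
      obtain ⟨n1, n2, n3, n4, n5⟩ := hc
      simp [n1, n2, n3, n4, n5, Ne.symm n1, Ne.symm n2, Ne.symm n3, Ne.symm n4, Ne.symm n5] at *
      tauto

-- ===== VERDICT (by name: the statement is the Claim_ definition above) =====
theorem validate_skillname_spec : Claim_equal_validate_skillname := by
  intro incoming _
  unfold Spec_validate_skillname validate_skillname validate_skillname_alt
  rw [loop_eq_all]
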